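-- pv_equiv track=rewrite | github.com/psymoney/prepCodingTest | BOJ/python/15565.py | answer
-- ===== SOURCE A (Python) =====
-- from math import inf
--
-- def answer(arr: list, k: int) -> int:
--     l = 0
--     cnt = 0
--     min_len = inf
--     for r in range(len(arr)):
--         if arr[r] == 1:
--             cnt += 1
--             if cnt == 1:
--                 l = r
--         if cnt == k:
--             min_len = min(min_len, r - l + 1)
--             l += 1
--             cnt -= 1
--             while arr[l] != 1:
--                 l += 1
--
--     return min_len if min_len != inf else -1
-- ===== SOURCE B (Python) =====
-- def answer(arr: list, k: int) -> int:
--     if k <= 0: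
--         return -1
--     ones = [i for i, v in enumerate(arr) if v == 1]
--     if len(ones) < k:
--         return -1
--     return min(ones[i + k - 1] - ones[i] + 1 for i in range(len(ones) - k + 1))
-- ===== Notes on version B (the rewrite author's own statement) =====
-- stated objective: alternative
-- what changed: Replaced the two-pointer sliding window (with its inner while-scan for the next 1) by building the list of indices of 1s once and taking the minimum of ones[i+k-1]-ones[i]+1 over all windows of k consecutive ones.
import Mathlib
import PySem

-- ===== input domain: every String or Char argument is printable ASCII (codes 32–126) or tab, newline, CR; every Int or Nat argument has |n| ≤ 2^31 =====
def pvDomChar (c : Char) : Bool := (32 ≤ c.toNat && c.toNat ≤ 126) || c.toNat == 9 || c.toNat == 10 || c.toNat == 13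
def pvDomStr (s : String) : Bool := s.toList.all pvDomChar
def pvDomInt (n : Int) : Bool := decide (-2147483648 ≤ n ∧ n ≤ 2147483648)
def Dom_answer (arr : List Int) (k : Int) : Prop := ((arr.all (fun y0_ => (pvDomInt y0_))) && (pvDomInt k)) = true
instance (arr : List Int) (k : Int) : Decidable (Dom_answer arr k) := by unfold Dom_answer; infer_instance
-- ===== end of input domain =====

-- B replaces A's two-pointer sliding window by an index table of the 1s plus a windowed min
-- (alternative algorithm, same cost); the equivalence is about the RETURN value (neither mutates arr).

-- ===== PORT A =====
-- the inner `while arr[l] != 1: l += 1` loop; none = IndexError (l ran past the end)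
def pvAdvance (arr : List Int) (l : Nat) : Option Nat :=
  match h : PySem.List.pyGet? arr (l : Int) with
  | none => none
  | some v => if v ≠ 1 then pvAdvance arr (l + 1) else some l
termination_by arr.length - l
decreasing_by
  rcases Nat.lt_or_ge l arr.length with hl | hl
  · omega
  · rw [PySem.List.pyGet?_natCast, List.getElem?_eq_none hl] at h
    exact absurd h (by simp)

-- one iteration of A's `for r in range(len(arr))` body over state (l, cnt, min_len);
-- min_len = inf is modelled as `none`; none state = IndexError raised earlier
def pvStep (arr : List Int) (k : Int) (st : Nat × Int × Option Int) (r : Nat) : Option (Nat × Int × Option Int) :=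
  let l := st.1; let cnt := st.2.1; let m := st.2.2
  -- arr[r]: r < len arr always (r drawn from range(len(arr))), so getD is exact here
  let cnt' := if arr.getD r 0 = 1 then cnt + 1 else cnt
  let l₁ := if arr.getD r 0 = 1 ∧ cnt' = 1 then r else l
  if cnt' = k then
    let m' : Option Int := some (match m with | none => (r : Int) - (l₁ : Int) + 1 | some v => min v ((r : Int) - (l₁ : Int) + 1))
    match pvAdvance arr (l₁ + 1) with
    | none => none
    | some l₂ => some (l₂, cnt' - 1, m')
  else some (l₁, cnt', m)

def answer (arr : List Int) (k : Int) : Int :=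
  match (List.range arr.length).foldl
      (fun st r => match st with | none => none | some s => pvStep arr k s r)
      (some (0, 0, none)) with
  | some (_, _, some m) => m
  | some (_, _, none) => -1   -- min_len still inf
  | none => 0                 -- unreachable under Pre_answer (IndexError)

-- ===== PORT B =====
def answer_alt (arr : List Int) (k : Int) : Int :=
  if k ≤ 0 then -1
  else
    -- [i for i, v in enumerate(arr) if v == 1]: the kept pairs are exactly (i, arr[i]) with
    -- arr[i] == 1, so this is the index range filtered by the value test (exact)
    let ones : List Int := ((List.range arr.length).filter (fun i => arr.getD i 0 = 1)).map (fun i : Nat => (i : Int))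
    if (ones.length : Int) < k then -1
    else
      let kn := k.toNat
      -- all indices below are in range, so getD is exact for ones[i+k-1] / ones[i]
      let vals := (List.range (ones.length - kn + 1)).map
        (fun i => ones.getD (i + kn - 1) 0 - ones.getD i 0 + 1)
      (PySem.List.min? vals (fun x => x)).getD (-1)  -- vals nonempty, so min returns its value

-- ===== PRECONDITION & SPEC =====
-- Pre_answer excludes exactly the inputs on which A raises IndexError (the inner while-scan
-- runs off the end of the list): k = 1 with a 1 present, and k = 0 with arr nonempty not starting with 1.
def Pre_answer (arr : List Int) (k : Int) : Prop :=
  k < 0 ∨ (k = 0 ∧ (arr = [] ∨ arr.getD 0 0 = 1)) ∨ (k = 1 ∧ ¬ (1 ∈ arr)) ∨ 2 ≤ k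
instance (arr : List Int) (k : Int) : Decidable (Pre_answer arr k) := by unfold Pre_answer; infer_instance

def pvWitness_answer : List Int × Int := ([1, 0, 1], 2)

def Spec_answer (arr : List Int) (k : Int) (out : Int) : Prop := out = answer_alt arr k
instance (arr : List Int) (k : Int) (out : Int) : Decidable (Spec_answer arr k out) := by unfold Spec_answer; infer_instance

-- ===== CLAIM (what is proved, stated in full; the proofs are below) =====
def Claim_equal_answer : Prop := ∀ (arr : List Int) (k : Int), Dom_answer arr k → Pre_answer arr k → Spec_answer arr k (answer arr k)

-- ===== LEMMAS AND PROOFS =====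

-- number of ones among the first r entries
def pvCnt (arr : List Int) (r : Nat) : Nat :=
  ((List.range r).filter (fun i => arr.getD i 0 = 1)).length

-- indices of the ones
def pvO (arr : List Int) : List Nat :=
  (List.range arr.length).filter (fun i => arr.getD i 0 = 1)

-- running min of f over 0..t
def pvWm (f : Nat → Int) : Nat → Int
  | 0 => f 0
  | t + 1 => min (pvWm f t) (f (t + 1))

-- running-min state A's loop maintains, as a function of the number of ones seen (K = k.toNat ≥ 2)
def pvF (arr : List Int) (K : Nat) (i : Nat) : Int :=
  ((pvO arr).getD (i + K - 1) 0 : Int) - ((pvO arr).getD i 0 : Int) + 1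

def pvStv (arr : List Int) (K : Nat) (r : Nat) : Nat × Int × Option Int :=
  (if pvCnt arr r = 0 then 0 else (pvO arr).getD (pvCnt arr r - min (pvCnt arr r) (K - 1)) 0,
   ((min (pvCnt arr r) (K - 1) : Nat) : Int),
   if pvCnt arr r < K then none else some (pvWm (pvF arr K) (pvCnt arr r - K)))

theorem pvCnt_zero (arr : List Int) : pvCnt arr 0 = 0 := rfl

theorem pvCnt_succ (arr : List Int) (r : Nat) :
    pvCnt arr (r + 1) = pvCnt arr r + if arr.getD r 0 = 1 then 1 else 0 := by
  simp only [pvCnt, List.range_succ, List.filter_append, List.length_append]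
  by_cases h : arr.getD r 0 = 1 <;>
    simp only [List.getD_eq_getElem?_getD] at h <;>
    simp [h]

theorem pvSplit (arr : List Int) (r : Nat) (h : r ≤ arr.length) :
    pvO arr = (List.range r).filter (fun i => arr.getD i 0 = 1)
      ++ (List.range' r (arr.length - r)).filter (fun i => arr.getD i 0 = 1) := by
  rw [pvO, List.range_eq_range', show arr.length = r + (arr.length - r) by omega,
    ← List.range'_append (s := 0) (m := r) (n := arr.length - r) (step := 1),
    List.filter_append, List.range_eq_range']
  simp

theorem pvCnt_le_lenO (arr : List Int) (r : Nat) (h : r ≤ arr.length) :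
    pvCnt arr r ≤ (pvO arr).length := by
  rw [pvSplit arr r h]; simp [pvCnt]

theorem pvCnt_len (arr : List Int) : pvCnt arr arr.length = (pvO arr).length := rfl

theorem pvO_getElem?_cnt (arr : List Int) (r : Nat) (hr : r < arr.length)
    (hq : arr.getD r 0 = 1) : (pvO arr)[pvCnt arr r]? = some r := by
  rw [pvSplit arr r (by omega)]
  rw [List.getElem?_append_right (by simp [pvCnt])]
  have h1 : arr.length - r = (arr.length - r - 1) + 1 := by omega
  rw [h1, List.range'_succ]
  simp only [List.getD_eq_getElem?_getD] at hq
  simp [hq, pvCnt]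

theorem pvAdvance_fuel (arr : List Int) :
    ∀ (m x : Nat), arr.length - x = m →
      pvAdvance arr x = ((List.range' x (arr.length - x)).filter (fun i => arr.getD i 0 = 1)).head? := by
  intro m
  induction m with
  | zero =>
    intro x hx
    rw [pvAdvance, hx]
    have hlen : arr.length ≤ x := by omega
    rw [PySem.List.pyGet?_natCast, List.getElem?_eq_none hlen]
    simp
  | succ m ih =>
    intro x hx
    have hxlt : x < arr.length := by omega
    rw [pvAdvance, PySem.List.pyGet?_natCast, List.getElem?_eq_getElem hxlt]
    have hsp : arr.length - x = m + 1 := hx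
    rw [hsp, List.range'_succ, List.filter_cons]
    have hgd : arr.getD x 0 = arr[x] := List.getD_eq_getElem _ _ hxlt
    by_cases hv : arr[x] = 1
    · simp [hv, List.getElem?_eq_getElem hxlt]
    · have hrec := ih (x + 1) (by omega)
      have hlen2 : arr.length - (x + 1) = m := by omega
      rw [hlen2] at hrec
      simp [hv, List.getElem?_eq_getElem hxlt, hrec]

theorem pvAdvance_eq (arr : List Int) (x : Nat) (h : x ≤ arr.length) :
    pvAdvance arr x = (pvO arr)[pvCnt arr x]? := by
  rw [pvAdvance_fuel arr (arr.length - x) x rfl, pvSplit arr x h,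
    List.getElem?_append_right (by simp [pvCnt]), List.head?_eq_getElem?]
  simp [pvCnt]

theorem pvO_pairwise (arr : List Int) : (pvO arr).Pairwise (· < ·) :=
  List.Pairwise.filter _ List.pairwise_lt_range

theorem pvO_nodup (arr : List Int) : (pvO arr).Nodup :=
  List.Nodup.filter _ List.nodup_range

theorem pvO_getD_lt (arr : List Int) (i : Nat) (h : i < (pvO arr).length) :
    (pvO arr).getD i 0 < arr.length ∧ arr.getD ((pvO arr).getD i 0) 0 = 1 := by
  rw [List.getD_eq_getElem _ _ h]
  have := List.getElem_mem h
  simp only [pvO, List.mem_filter, List.mem_range, decide_eq_true_eq] at this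
  exact this

-- the (i)-th one has exactly i+1 ones at or below it
theorem pvFilter_range_eq_take (arr : List Int) (m : Nat) (h : m ≤ arr.length) :
    (List.range m).filter (fun j => arr.getD j 0 = 1) = (pvO arr).take (pvCnt arr m) := by
  rw [pvSplit arr m h]
  exact (List.take_left' rfl).symm

theorem pvCnt_O_succ (arr : List Int) (i : Nat) (h : i < (pvO arr).length) :
    pvCnt arr ((pvO arr).getD i 0 + 1) = i + 1 := by
  have hxe : (pvO arr).getD i 0 = (pvO arr)[i] := List.getD_eq_getElem _ _ h
  have hmemO := pvO_getD_lt arr i h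
  have hsplit := pvSplit arr ((pvO arr).getD i 0 + 1) (by omega)
  have htake := pvFilter_range_eq_take arr ((pvO arr).getD i 0 + 1) (by omega)
  have hcle : pvCnt arr ((pvO arr).getD i 0 + 1) ≤ (pvO arr).length :=
    pvCnt_le_lenO arr _ (by omega)
  have hic : i < pvCnt arr ((pvO arr).getD i 0 + 1) := by
    have hmem : (pvO arr).getD i 0 ∈ (pvO arr).take (pvCnt arr ((pvO arr).getD i 0 + 1)) := by
      rw [← htake]
      simp only [List.mem_filter, List.mem_range, decide_eq_true_eq]
      exact ⟨by omega, hmemO.2⟩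
    obtain ⟨j, hj, hje⟩ := List.mem_iff_getElem.mp hmem
    rw [List.getElem_take] at hje
    have hjlen : j < (pvO arr).length := by
      have := List.length_take (i := pvCnt arr ((pvO arr).getD i 0 + 1)) (l := pvO arr); omega
    have hji : j = i := ((pvO_nodup arr).getElem_inj_iff).mp (by rw [hje, hxe])
    have : j < pvCnt arr ((pvO arr).getD i 0 + 1) := by
      have := List.length_take (i := pvCnt arr ((pvO arr).getD i 0 + 1)) (l := pvO arr); omega
    omega
  have hci : pvCnt arr ((pvO arr).getD i 0 + 1) ≤ i + 1 := by
    by_contra hlt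
    have hi1len : i + 1 < (pvO arr).length := by omega
    have hmem : (pvO arr)[i+1] ∈ (pvO arr).take (pvCnt arr ((pvO arr).getD i 0 + 1)) := by
      have h2 : i + 1 < ((pvO arr).take (pvCnt arr ((pvO arr).getD i 0 + 1))).length := by
        have := List.length_take (i := pvCnt arr ((pvO arr).getD i 0 + 1)) (l := pvO arr); omega
      have := List.getElem_mem h2
      rwa [List.getElem_take] at this
    rw [← htake] at hmem
    simp only [List.mem_filter, List.mem_range, decide_eq_true_eq] at hmem
    have : (pvO arr)[i] < (pvO arr)[i+1] :=
      (List.pairwise_iff_getElem.mp (pvO_pairwise arr)) i (i+1) (by omega) hi1len (by omega)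
    omega
  omega

def pvFold (arr : List Int) (k : Int) (r : Nat) : Option (Nat × Int × Option Int) :=
  (List.range r).foldl
    (fun st r => match st with | none => none | some s => pvStep arr k s r)
    (some (0, 0, none))

theorem answer_eq_fold (arr : List Int) (k : Int) :
    answer arr k = (match pvFold arr k arr.length with
      | some (_, _, some m) => m | some (_, _, none) => -1 | none => 0) := rfl

theorem pvFold_succ (arr : List Int) (k : Int) (r : Nat) :
    pvFold arr k (r + 1) = (match pvFold arr k r with
      | none => none | some s => pvStep arr k s r) := by
  simp [pvFold, List.range_succ]

theorem pvCnt_mono (arr : List Int) : ∀ (r s : Nat), r ≤ s → pvCnt arr r ≤ pvCnt arr s := by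
  intro r s h
  induction s with
  | zero =>
    have hr0 : r = 0 := by omega
    subst hr0; exact le_rfl
  | succ s ih =>
    rcases Nat.lt_or_ge r (s + 1) with h2 | h2
    · have := ih (by omega)
      rw [pvCnt_succ]
      split_ifs <;> omega
    · have : r = s + 1 := by omega
      subst this; exact le_rfl

-- the main sliding-window invariant: A's loop state after r steps, for k ≥ 2
theorem pvStep_inv (arr : List Int) (k : Int) (hk : 2 ≤ k) (r : Nat) (hr : r < arr.length) :
    pvStep arr k (pvStv arr k.toNat r) r = some (pvStv arr k.toNat (r + 1)) := by
  have hkK : k = (k.toNat : Int) := by omega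
  have hK2 : 2 ≤ k.toNat := by omega
  have hcle : pvCnt arr r ≤ (pvO arr).length := pvCnt_le_lenO arr r (by omega)
  by_cases hq : arr.getD r 0 = 1
  · have hc1 : pvCnt arr (r + 1) = pvCnt arr r + 1 := by rw [pvCnt_succ, if_pos hq]
    have hcO : (pvO arr)[pvCnt arr r]? = some r := pvO_getElem?_cnt arr r hr hq
    obtain ⟨hclt, hcr⟩ := List.getElem?_eq_some_iff.mp hcO
    have hgetc : (pvO arr).getD (pvCnt arr r) 0 = r := by
      rw [List.getD_eq_getElem _ _ hclt, hcr]
    simp only [pvStep, pvStv, hc1]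
    rw [if_pos hq]
    rcases Nat.lt_or_ge (pvCnt arr r) (k.toNat - 1) with hsm | hbig
    · -- window not yet full: branch does not fire
      have hmin : min (pvCnt arr r) (k.toNat - 1) = pvCnt arr r := by omega
      have hmin' : min (pvCnt arr r + 1) (k.toNat - 1) = pvCnt arr r + 1 := by omega
      rw [hmin, hmin']
      have hne : ¬(((pvCnt arr r : Nat) : Int) + 1 = k) := by rw [hkK]; push_cast; omega
      rw [if_neg hne, if_neg (by omega : ¬(pvCnt arr r + 1 = 0)),
        if_pos (by omega : pvCnt arr r + 1 < k.toNat),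
        if_pos (by omega : pvCnt arr r < k.toNat),
        show pvCnt arr r + 1 - (pvCnt arr r + 1) = 0 by omega]
      by_cases hc0 : pvCnt arr r = 0
      · rw [if_pos (by rw [hc0]; exact ⟨hq, by norm_num⟩ : arr.getD r 0 = 1 ∧ ((pvCnt arr r : Nat) : Int) + 1 = 1)]
        rw [hc0] at hgetc ⊢
        rw [hgetc]
        norm_num
      · have hne1 : ¬(arr.getD r 0 = 1 ∧ ((pvCnt arr r : Nat) : Int) + 1 = 1) := by
          rintro ⟨-, h2⟩; apply hc0; omega
        rw [if_neg hne1, if_neg hc0, show pvCnt arr r - pvCnt arr r = 0 from by omega]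
        push_cast
        ring_nf
    · -- window complete: min_len is updated and l advances to the next one
      have hmin : min (pvCnt arr r) (k.toNat - 1) = k.toNat - 1 := by omega
      have hmin' : min (pvCnt arr r + 1) (k.toNat - 1) = k.toNat - 1 := by omega
      rw [hmin, hmin']
      have hbr : ((k.toNat - 1 : Nat) : Int) + 1 = k := by omega
      rw [if_pos hbr]
      have hl1ne : ¬(arr.getD r 0 = 1 ∧ ((k.toNat - 1 : Nat) : Int) + 1 = 1) := by
        rintro ⟨-, h2⟩; omega
      rw [if_neg hl1ne, if_neg (by omega : ¬(pvCnt arr r = 0)),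
        if_neg (by omega : ¬(pvCnt arr r + 1 = 0))]
      have hi0lt : pvCnt arr r - (k.toNat - 1) < (pvO arr).length := by omega
      have hi1lt : pvCnt arr r - (k.toNat - 1) + 1 < (pvO arr).length := by omega
      have hO1 := pvO_getD_lt arr (pvCnt arr r - (k.toNat - 1)) hi0lt
      have hadv : pvAdvance arr ((pvO arr).getD (pvCnt arr r - (k.toNat - 1)) 0 + 1)
          = some ((pvO arr).getD (pvCnt arr r - (k.toNat - 1) + 1) 0) := by
        rw [pvAdvance_eq arr _ (by omega), pvCnt_O_succ arr _ hi0lt,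
          List.getD_eq_getElem _ _ hi1lt, List.getElem?_eq_getElem hi1lt]
      rw [hadv]
      have hidx : pvCnt arr r + 1 - (k.toNat - 1) = pvCnt arr r - (k.toNat - 1) + 1 := by omega
      rw [hidx]
      by_cases hcK : pvCnt arr r < k.toNat
      · -- first complete window
        rw [if_pos hcK, if_neg (by omega : ¬(pvCnt arr r + 1 < k.toNat)),
          show pvCnt arr r + 1 - k.toNat = 0 from by omega,
          show pvCnt arr r - (k.toNat - 1) = 0 from by omega]
        simp only [pvWm, pvF]
        rw [show 0 + k.toNat - 1 = pvCnt arr r from by omega, hgetc]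
        norm_num
      · rw [if_neg hcK, if_neg (by omega : ¬(pvCnt arr r + 1 < k.toNat)),
          show pvCnt arr r + 1 - k.toNat = (pvCnt arr r - k.toNat) + 1 from by omega]
        simp only [pvWm, pvF]
        rw [show pvCnt arr r - k.toNat + 1 + k.toNat - 1 = pvCnt arr r from by omega, hgetc,
          show pvCnt arr r - k.toNat + 1 = pvCnt arr r - (k.toNat - 1) from by omega]
        norm_num
  · have hc1 : pvCnt arr (r + 1) = pvCnt arr r := by rw [pvCnt_succ, if_neg hq]; exact Nat.add_zero _
    have hne : ¬(((min (pvCnt arr r) (k.toNat - 1) : Nat) : Int) = k) := by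
      rw [hkK]; push_cast; omega
    simp only [pvStep, pvStv, hc1]
    rw [if_neg hq, if_neg hne, if_neg (fun h => hq h.1)]

theorem pvFold_inv (arr : List Int) (k : Int) (hk : 2 ≤ k) :
    ∀ r, r ≤ arr.length → pvFold arr k r = some (pvStv arr k.toNat r) := by
  intro r
  induction r with
  | zero =>
    intro _
    have hK2 : 2 ≤ k.toNat := by omega
    simp [pvFold, pvStv, pvCnt, (show 0 < k.toNat by omega)]
  | succ r ih =>
    intro h
    rw [pvFold_succ, ih (by omega)]
    exact pvStep_inv arr k hk r (by omega)

-- when the count never reaches k, the branch never fires and min_len stays inf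
theorem pvFold_easy (arr : List Int) (k : Int)
    (h : ∀ r, r < arr.length → ((pvCnt arr (r + 1) : Nat) : Int) ≠ k) :
    ∀ r, r ≤ arr.length → ∃ l, pvFold arr k r = some (l, ((pvCnt arr r : Nat) : Int), none) := by
  intro r
  induction r with
  | zero => intro _; exact ⟨0, rfl⟩
  | succ r ih =>
    intro hle
    obtain ⟨l, hl⟩ := ih (by omega)
    rw [pvFold_succ, hl]
    by_cases hq : arr.getD r 0 = 1
    · have hc1 : pvCnt arr (r + 1) = pvCnt arr r + 1 := by rw [pvCnt_succ, if_pos hq]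
      have hne : ¬(((pvCnt arr r : Nat) : Int) + 1 = k) := by
        intro hc; apply h r (by omega); rw [hc1]; push_cast; omega
      refine ⟨if arr.getD r 0 = 1 ∧ ((pvCnt arr r : Nat) : Int) + 1 = 1 then r else l, ?_⟩
      simp only [pvStep]
      rw [if_pos hq, if_neg hne, hc1]
      push_cast
      rfl
    · have hc1 : pvCnt arr (r + 1) = pvCnt arr r := by
        rw [pvCnt_succ, if_neg hq]; exact Nat.add_zero _
      have hne : ¬(((pvCnt arr r : Nat) : Int) = k) := by
        intro hc; exact h r (by omega) (by rw [hc1]; exact hc)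
      exact ⟨l, by
        simp only [pvStep]
        rw [if_neg hq, if_neg hne, if_neg (fun hh => hq hh.1), hc1]⟩

theorem pvCast_getD (l : List Nat) (j : Nat) :
    (l.map (fun i : Nat => (i : Int))).getD j 0 = ((l.getD j 0 : Nat) : Int) := by
  rcases Nat.lt_or_ge j l.length with hj | hj
  · rw [List.getD_eq_getElem _ _ (by simpa using hj), List.getD_eq_getElem _ _ hj,
      List.getElem_map]
  · rw [List.getD_eq_default _ _ (by simpa using hj), List.getD_eq_default _ _ hj]
    simp

theorem pvOnes_eq (arr : List Int) :
    ((List.range arr.length).filter (fun i => arr.getD i 0 = 1)).map (fun i : Nat => (i : Int))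
      = (pvO arr).map (fun i : Nat => (i : Int)) := rfl

theorem pvWm_foldl (f : Nat → Int) : ∀ t, pvWm f t = ((List.range t).map (fun i => f (i + 1))).foldl min (f 0) := by
  intro t
  induction t with
  | zero => rfl
  | succ t ih => rw [pvWm, ih, List.range_succ, List.map_append, List.foldl_append]; rfl

theorem pvMin?_range (f : Nat → Int) (t : Nat) :
    PySem.List.min? ((List.range (t + 1)).map f) (fun x => x) = some (pvWm f t) := by
  rw [List.range_succ_eq_map, List.map_cons, List.map_map, PySem.List.min?_id_cons, pvWm_foldl]
  rfl

theorem answer_spec : Claim_equal_answer := by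
  intro arr k _ hpre
  unfold Spec_answer
  rcases hpre with hneg | ⟨hk0, hz⟩ | ⟨hk1, hno⟩ | hk2
  · -- k < 0 : cnt never reaches k
    have h : ∀ r, r < arr.length → ((pvCnt arr (r + 1) : Nat) : Int) ≠ k := by
      intro r _; omega
    obtain ⟨l, hl⟩ := pvFold_easy arr k h arr.length le_rfl
    rw [answer_eq_fold, hl]
    simp only [answer_alt]
    rw [if_pos (by omega : k ≤ 0)]
  · -- k = 0, arr empty or starting with 1
    subst hk0
    rcases hz with hnil | h1
    · subst hnil; decide
    · have hc1 : pvCnt arr 1 = 1 := by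
        rw [show (1 : Nat) = 0 + 1 from rfl, pvCnt_succ, if_pos h1, pvCnt_zero]
      have hlen : 0 < arr.length := by
        by_contra hl
        have : arr = [] := List.eq_nil_of_length_eq_zero (by omega)
        subst this; simp at h1
      have h : ∀ r, r < arr.length → ((pvCnt arr (r + 1) : Nat) : Int) ≠ 0 := by
        intro r _
        have := pvCnt_mono arr 1 (r + 1) (by omega)
        omega
      obtain ⟨l, hl⟩ := pvFold_easy arr 0 h arr.length le_rfl
      rw [answer_eq_fold, hl]
      simp only [answer_alt]
      rw [if_pos (by omega : (0:Int) ≤ 0)]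
  · -- k = 1 but no ones at all
    subst hk1
    have hq0 : ∀ i, i < arr.length → ¬(arr.getD i 0 = 1) := by
      intro i hi hcon
      rw [List.getD_eq_getElem arr 0 hi] at hcon
      exact hno (hcon ▸ List.getElem_mem hi)
    have hOnil : pvO arr = [] := by
      rw [pvO]
      exact List.filter_eq_nil_iff.mpr
        (fun i hi => by simpa using hq0 i (List.mem_range.mp hi))
    have hcz : ∀ m, m ≤ arr.length → pvCnt arr m = 0 := by
      intro m
      induction m with
      | zero => intro _; rfl
      | succ m ih =>
        intro hle
        rw [pvCnt_succ, if_neg (hq0 m (by omega)), ih (by omega)]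
    have h : ∀ r, r < arr.length → ((pvCnt arr (r + 1) : Nat) : Int) ≠ 1 := by
      intro r hrl
      rw [hcz (r + 1) (by omega)]
      norm_num
    obtain ⟨l, hl⟩ := pvFold_easy arr 1 h arr.length le_rfl
    rw [answer_eq_fold, hl]
    simp only [answer_alt]
    rw [if_neg (by omega : ¬((1:Int) ≤ 0)), pvOnes_eq, hOnil]
    norm_num
  · -- the real case k ≥ 2
    have hfold := pvFold_inv arr k hk2 arr.length le_rfl
    rw [answer_eq_fold, hfold]
    simp only [answer_alt]
    rw [if_neg (by omega : ¬(k ≤ 0)), pvOnes_eq]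
    rw [List.length_map]
    have hclen : pvCnt arr arr.length = (pvO arr).length := pvCnt_len arr
    by_cases hlt : ((pvO arr).length : Int) < k
    · rw [if_pos hlt]
      simp only [pvStv]
      rw [if_pos (by omega : pvCnt arr arr.length < k.toNat)]
    · rw [if_neg hlt]
      simp only [pvStv]
      rw [if_neg (by omega : ¬(pvCnt arr arr.length < k.toNat))]
      have hfun : (fun i => ((pvO arr).map (fun i : Nat => (i : Int))).getD (i + k.toNat - 1) 0
            - ((pvO arr).map (fun i : Nat => (i : Int))).getD i 0 + 1) = pvF arr k.toNat := by
        funext i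
        rw [pvCast_getD, pvCast_getD, pvF]
      rw [hfun, hclen,
        show (pvO arr).length - k.toNat + 1 = ((pvO arr).length - k.toNat) + 1 from rfl,
        pvMin?_range]
      rfl
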